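-- pv_equiv track=rewrite | github.com/ozw4/seis_hypo | proc/prepare_data/jma/run_fill_to_48_stations.py | _threads_schedule
-- ===== SOURCE A (Python) =====
-- def _threads_schedule(base_threads: int, n_try: int) -> list[int]:
-- 	bt = int(base_threads)
-- 	if bt <= 0:
-- 		raise ValueError(f'invalid THREADS={base_threads}')
-- 	if int(n_try) <= 0:
-- 		raise ValueError(f'invalid MAX_RETRY_DOWNLOAD={n_try}')
--
-- 	seq: list[int] = [bt]
-- 	while len(seq) < 4 and seq[-1] > 1:
-- 		seq.append(max(1, seq[-1] // 2))
-- 	if seq[-1] != 1: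
-- 		seq.append(1)
-- 	while len(seq) < int(n_try):
-- 		seq.append(seq[-1])
-- 	return seq[: int(n_try)]
-- ===== SOURCE B (Python) =====
-- def _threads_schedule(base_threads: int, n_try: int) -> list[int]:
--     bt = int(base_threads)
--     if bt <= 0:
--         raise ValueError(f'invalid THREADS={base_threads}')
--     n = int(n_try)
--     if n <= 0:
--         raise ValueError(f'invalid MAX_RETRY_DOWNLOAD={n_try}')
--     return [max(1, bt >> i) if i < 4 else 1 for i in range(n)]
-- ===== Notes on version B (the rewrite author's own statement) =====
-- stated objective: simpler
-- what changed: Replaces the two while-loops and list mutation with a closed-form per-index comprehension: position i is max(1, bt >> i) for i < 4 and 1 afterwards.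
import Mathlib
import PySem

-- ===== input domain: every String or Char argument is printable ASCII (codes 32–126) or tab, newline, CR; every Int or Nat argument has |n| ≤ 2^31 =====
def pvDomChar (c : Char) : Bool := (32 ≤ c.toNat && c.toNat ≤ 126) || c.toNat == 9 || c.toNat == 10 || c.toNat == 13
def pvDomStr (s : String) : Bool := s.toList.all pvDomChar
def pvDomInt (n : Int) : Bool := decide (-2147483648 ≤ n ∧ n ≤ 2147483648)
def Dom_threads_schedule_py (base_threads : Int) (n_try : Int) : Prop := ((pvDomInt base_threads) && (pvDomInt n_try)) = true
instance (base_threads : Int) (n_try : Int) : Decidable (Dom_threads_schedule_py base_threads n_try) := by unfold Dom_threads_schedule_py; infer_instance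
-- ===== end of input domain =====

-- B replaces A's two while-loops and list mutation by a closed-form per-index comprehension (simpler).

-- ===== PORT A =====
def pvGrow (seq : List Int) : List Int :=
  if seq.length < 4 ∧ 1 < PySem.List.pyGetD seq (-1) 0 then
    pvGrow (seq ++ [max 1 (PySem.Int.floordiv (PySem.List.pyGetD seq (-1) 0) 2)])
  else seq
termination_by 4 - seq.length
decreasing_by simp_all; omega

def pvForceOne (seq : List Int) : List Int :=
  if PySem.List.pyGetD seq (-1) 0 ≠ 1 then seq ++ [1] else seq

def pvPad (fuel : Nat) (seq : List Int) : List Int :=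
  match fuel with
  | 0 => seq
  | f + 1 => pvPad f (seq ++ [PySem.List.pyGetD seq (-1) 0])

def threads_schedule_py (base_threads : Int) (n_try : Int) : List Int :=
  if base_threads ≤ 0 then []
  else if n_try ≤ 0 then []
  else
    PySem.List.slice
      (pvPad (n_try.toNat - (pvForceOne (pvGrow [base_threads])).length)
             (pvForceOne (pvGrow [base_threads])))
      none (some n_try)

def threads_schedule_py_alt (base_threads : Int) (n_try : Int) : List Int :=
  if base_threads ≤ 0 then []
  else if n_try ≤ 0 then []
  else (PySem.List.pyRange 0 n_try 1).map
    (fun i : Int => if i < 4 then max 1 (base_threads >>> i.toNat) else 1)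



-- ===== PRECONDITION & SPEC =====
-- Pre_ excludes exactly the inputs on which A raises ValueError (non-positive thread count or retry count).
def Pre_threads_schedule_py (base_threads : Int) (n_try : Int) : Prop :=
  1 ≤ base_threads ∧ 1 ≤ n_try
instance (base_threads : Int) (n_try : Int) : Decidable (Pre_threads_schedule_py base_threads n_try) := by
  unfold Pre_threads_schedule_py; infer_instance

def pvWitness_threads_schedule_py : Int × Int := (12, 6)

def Spec_threads_schedule_py (base_threads : Int) (n_try : Int) (out : List Int) : Prop :=
  out = threads_schedule_py_alt base_threads n_try
instance (base_threads : Int) (n_try : Int) (out : List Int) : Decidable (Spec_threads_schedule_py base_threads n_try out) := by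
  unfold Spec_threads_schedule_py; infer_instance

-- ===== CLAIM (what is proved, stated in full; the proofs are below) =====
def Claim_equal_threads_schedule_py : Prop := ∀ (base_threads : Int) (n_try : Int), Dom_threads_schedule_py base_threads n_try → Pre_threads_schedule_py base_threads n_try → Spec_threads_schedule_py base_threads n_try (threads_schedule_py base_threads n_try)

-- ===== LEMMAS AND PROOFS =====

-- closed-form value of position j of the schedule
def pvG (bt : Int) (j : Nat) : Int := if (j : Int) < 4 then max 1 (bt >>> j) else 1

lemma last1 (a : Int) : PySem.List.pyGetD [a] (-1) 0 = a := by
  simpa using PySem.List.pyGetD_neg_one_append_singleton (xs:=[]) (x:=a) (d:=0)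

lemma pvGrow_stop {seq : List Int} (h : ¬ (seq.length < 4 ∧ 1 < PySem.List.pyGetD seq (-1) 0)) :
    pvGrow seq = seq := by rw [pvGrow]; simp [h]

lemma pvGrow_step {seq : List Int} (h : seq.length < 4 ∧ 1 < PySem.List.pyGetD seq (-1) 0) :
    pvGrow seq = pvGrow (seq ++ [max 1 (PySem.Int.floordiv (PySem.List.pyGetD seq (-1) 0) 2)]) := by
  rw [pvGrow]; simp [h]

lemma pad_ones (k : Nat) (seq : List Int) (h : PySem.List.pyGetD seq (-1) 0 = 1) :
    pvPad k seq = seq ++ List.replicate k 1 := by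
  induction k generalizing seq with
  | zero => simp [pvPad]
  | succ f ih =>
      rw [pvPad, h, ih (seq ++ [1]) (PySem.List.pyGetD_neg_one_append_singleton ..)]
      simp [List.replicate_succ]

lemma take_core (g : Nat → Int) (L : List Int) (m : Nat)
    (hL : ∀ i, (h : i < L.length) → L[i] = g i) (h1 : ∀ j, L.length ≤ j → g j = 1) :
    (L ++ List.replicate (m - L.length) 1).take m = (List.range m).map g := by
  apply List.ext_getElem
  · simp; omega
  · intro i hi1 hi2
    simp only [List.getElem_take, List.getElem_map, List.getElem_range]
    by_cases hc : i < L.length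
    · rw [List.getElem_append_left hc]; exact hL i hc
    · rw [List.getElem_append_right (by omega)]
      simp [h1 i (by omega)]

lemma last2 (a b : Int) : PySem.List.pyGetD [a,b] (-1) 0 = b := by
  simpa using PySem.List.pyGetD_neg_one_append_singleton (xs:=[a]) (x:=b) (d:=0)
lemma last3 (a b c : Int) : PySem.List.pyGetD [a,b,c] (-1) 0 = c := by
  simpa using PySem.List.pyGetD_neg_one_append_singleton (xs:=[a,b]) (x:=c) (d:=0)
lemma last4 (a b c d : Int) : PySem.List.pyGetD [a,b,c,d] (-1) 0 = d := by
  simpa using PySem.List.pyGetD_neg_one_append_singleton (xs:=[a,b,c]) (x:=d) (d:=0)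
lemma last5 (a b c d e : Int) : PySem.List.pyGetD [a,b,c,d,e] (-1) 0 = e := by
  simpa using PySem.List.pyGetD_neg_one_append_singleton (xs:=[a,b,c,d]) (x:=e) (d:=0)

lemma core (bt : Int) (hbt : 1 ≤ bt) :
    ∃ L : List Int, pvForceOne (pvGrow [bt]) = L ∧
    PySem.List.pyGetD L (-1) 0 = 1 ∧
    (∀ i, (h : i < L.length) → L[i] = pvG bt i) ∧
    (∀ j, L.length ≤ j → pvG bt j = 1) := by
  have hsr0 : bt >>> (0:Nat) = bt := by simp
  have hsr1 : bt >>> (1:Nat) = bt / 2 := by rw [Int.shiftRight_eq_div_pow]; norm_num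
  have hsr2 : bt >>> (2:Nat) = bt / 4 := by rw [Int.shiftRight_eq_div_pow]; norm_num
  have hsr3 : bt >>> (3:Nat) = bt / 8 := by rw [Int.shiftRight_eq_div_pow]; norm_num
  by_cases h2 : bt ≤ 1
  · -- bt = 1, L = [1]
    have hb : bt = 1 := le_antisymm h2 hbt
    subst hb
    have hG : pvGrow [1] = [1] := by rw [pvGrow_stop]; rw [last1]; omega
    have hF : pvForceOne (pvGrow [1]) = [1] := by rw [hG, pvForceOne, last1]; simp
    refine ⟨[1], hF, last1 1, ?_, ?_⟩
    · intro i h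
      simp only [List.length_singleton, Nat.lt_one_iff] at h
      subst h; simp [pvG]
    · intro j hj; simp at hj
      by_cases hj4 : (j:Int) < 4
      · have : (1:Int) >>> j = 1 / (2^j : Nat) := Int.shiftRight_eq_div_pow 1 j
        simp only [pvG, if_pos hj4, this]
        have h2j : (2:Int) ≤ (2^j : Nat) := by
          have := Nat.one_lt_two_pow_iff.mpr (by omega : j ≠ 0)
          exact_mod_cast this
        rw [max_eq_left (by
          apply Int.ediv_le_of_le_mul <;> omega)]
      · simp [pvG, hj4]
  · by_cases h4 : bt ≤ 3
    · -- L = [bt, 1]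
      have hG : pvGrow [bt] = [bt, 1] := by
        rw [pvGrow_step ⟨by simp, by rw [last1]; omega⟩, last1,
            PySem.Int.floordiv_eq_ediv_of_pos (by omega),
            max_eq_right (by omega), (by omega : bt / 2 = 1)]
        rw [pvGrow_stop]; · rfl
        · rw [List.singleton_append, last2]; omega
      have hF : pvForceOne (pvGrow [bt]) = [bt, 1] := by rw [hG, pvForceOne, last2]; simp
      refine ⟨[bt, 1], hF, last2 .., ?_, ?_⟩
      · intro i h
        have hlen : i < 2 := by simpa using h
        interval_cases i
        · simp [pvG, hsr0]; omega
        · simp [pvG, hsr1]; omega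
      · intro j hj; simp at hj
        by_cases hj4 : (j:Int) < 4
        · have hj3 : j ≤ 3 := by omega
          interval_cases j
          · simp [pvG, hsr2]; omega
          · simp [pvG, hsr3]; omega
        · simp [pvG, hj4]
    · by_cases h8 : bt ≤ 7
      · -- L = [bt, bt/2, 1]
        have hG : pvGrow [bt] = [bt, bt/2, 1] := by
          rw [pvGrow_step ⟨by simp, by rw [last1]; omega⟩, last1,
              PySem.Int.floordiv_eq_ediv_of_pos (by omega), max_eq_right (by omega),
              List.singleton_append]
          rw [pvGrow_step ⟨by simp, by rw [last2]; omega⟩, last2,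
              PySem.Int.floordiv_eq_ediv_of_pos (by omega), max_eq_right (by omega),
              (by omega : bt / 2 / 2 = 1)]
          rw [pvGrow_stop]; · rfl
          · rw [show ([bt, bt/2] ++ [1] : List Int) = [bt, bt/2, 1] from rfl, last3]; omega
        have hF : pvForceOne (pvGrow [bt]) = [bt, bt/2, 1] := by rw [hG, pvForceOne, last3]; simp
        refine ⟨[bt, bt/2, 1], hF, last3 .., ?_, ?_⟩
        · intro i h
          have hlen : i < 3 := by simpa using h
          interval_cases i
          · simp [pvG, hsr0]; omega
          · simp [pvG, hsr1]; omega
          · simp [pvG, hsr2]; omega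
        · intro j hj; simp at hj
          by_cases hj4 : (j:Int) < 4
          · have hj3 : j ≤ 3 := by omega
            interval_cases j
            · simp [pvG, hsr3]; omega
          · simp [pvG, hj4]
      · by_cases h16 : bt ≤ 15
        · -- L = [bt, bt/2, bt/4, 1]
          have hG : pvGrow [bt] = [bt, bt/2, bt/4, 1] := by
            rw [pvGrow_step ⟨by simp, by rw [last1]; omega⟩, last1,
                PySem.Int.floordiv_eq_ediv_of_pos (by omega), max_eq_right (by omega),
                List.singleton_append]
            rw [pvGrow_step ⟨by simp, by rw [last2]; omega⟩, last2,
                PySem.Int.floordiv_eq_ediv_of_pos (by omega), max_eq_right (by omega),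
                (by omega : bt / 2 / 2 = bt / 4),
                show ([bt, bt/2] ++ [bt/4] : List Int) = [bt, bt/2, bt/4] from rfl]
            rw [pvGrow_step ⟨by simp, by rw [last3]; omega⟩, last3,
                PySem.Int.floordiv_eq_ediv_of_pos (by omega), max_eq_right (by omega),
                (by omega : bt / 4 / 2 = 1),
                show ([bt, bt/2, bt/4] ++ [1] : List Int) = [bt, bt/2, bt/4, 1] from rfl]
            rw [pvGrow_stop]; simp
          have hF : pvForceOne (pvGrow [bt]) = [bt, bt/2, bt/4, 1] := by
            rw [hG, pvForceOne, last4]; simp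
          refine ⟨[bt, bt/2, bt/4, 1], hF, last4 .., ?_, ?_⟩
          · intro i h
            have hlen : i < 4 := by simpa using h
            interval_cases i
            · simp [pvG, hsr0]; omega
            · simp [pvG, hsr1]; omega
            · simp [pvG, hsr2]; omega
            · simp [pvG, hsr3]; omega
          · intro j hj; simp at hj
            by_cases hj4 : (j:Int) < 4
            · omega
            · simp [pvG, hj4]
        · -- bt >= 16: L = [bt, bt/2, bt/4, bt/8, 1]
          have hG : pvGrow [bt] = [bt, bt/2, bt/4, bt/8] := by
            rw [pvGrow_step ⟨by simp, by rw [last1]; omega⟩, last1,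
                PySem.Int.floordiv_eq_ediv_of_pos (by omega), max_eq_right (by omega),
                List.singleton_append]
            rw [pvGrow_step ⟨by simp, by rw [last2]; omega⟩, last2,
                PySem.Int.floordiv_eq_ediv_of_pos (by omega), max_eq_right (by omega),
                (by omega : bt / 2 / 2 = bt / 4),
                show ([bt, bt/2] ++ [bt/4] : List Int) = [bt, bt/2, bt/4] from rfl]
            rw [pvGrow_step ⟨by simp, by rw [last3]; omega⟩, last3,
                PySem.Int.floordiv_eq_ediv_of_pos (by omega), max_eq_right (by omega),
                (by omega : bt / 4 / 2 = bt / 8),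
                show ([bt, bt/2, bt/4] ++ [bt/8] : List Int) = [bt, bt/2, bt/4, bt/8] from rfl]
            rw [pvGrow_stop]; simp
          have hF : pvForceOne (pvGrow [bt]) = [bt, bt/2, bt/4, bt/8, 1] := by
            rw [hG, pvForceOne, last4, if_pos (by omega)]; rfl
          refine ⟨[bt, bt/2, bt/4, bt/8, 1], hF, last5 .., ?_, ?_⟩
          · intro i h
            have hlen : i < 5 := by simpa using h
            interval_cases i
            · simp [pvG, hsr0]; omega
            · simp [pvG, hsr1]; omega
            · simp [pvG, hsr2]; omega
            · simp [pvG, hsr3]; omega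
            · simp [pvG]
          · intro j hj; simp at hj
            by_cases hj4 : (j:Int) < 4
            · omega
            · simp [pvG, hj4]

lemma alt_eq (bt n : Int) (hbt : 1 ≤ bt) (hn : 1 ≤ n) :
    threads_schedule_py_alt bt n = (List.range n.toNat).map (pvG bt) := by
  unfold threads_schedule_py_alt
  rw [if_neg (by omega), if_neg (by omega), PySem.List.pyRange_one]
  simp only [sub_zero, List.map_map]
  apply List.map_congr_left
  intro k hk
  simp [pvG]

theorem main (bt n : Int) (hbt : 1 ≤ bt) (hn : 1 ≤ n) :
    threads_schedule_py bt n = threads_schedule_py_alt bt n := by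
  unfold threads_schedule_py
  rw [if_neg (by omega), if_neg (by omega)]
  obtain ⟨L, hF, hlast, hL, h1⟩ := core bt hbt
  rw [hF, pad_ones _ _ hlast, PySem.List.slice_to _ (by omega),
      take_core (pvG bt) L n.toNat hL h1, ← alt_eq bt n hbt hn]

-- ===== VERDICT (by name: the statement is the Claim_ definition above) =====
theorem threads_schedule_py_spec : Claim_equal_threads_schedule_py := by
  intro bt n _ hpre
  unfold Spec_threads_schedule_py
  exact main bt n hpre.1 hpre.2
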